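-- pv_equiv track=rewrite | github.com/zarify/advent_of_code | 2023/12_1.py | all_combos
-- ===== SOURCE A (Python) =====
-- def all_combos(s):
--     """
--     Return a list of all possible combinations of the string
--     replacing ? characters with either a . or a # character
--     recursively.
--     For example "???.###" should return ["###.###","#..###","#.#.###", ...] etc
--     """
--     if "?" not in s:
--         return [s]
--
--     combos = []
--     for c in [".", "#"]:
--         new_s = s.replace("?", c, 1)
--         combos.extend(all_combos(new_s))
--
--     return combos
-- ===== SOURCE B (Python) =====
-- def all_combos(s):
--     """Iterative single pass: grow every partial expansion character by character."""
--     res = [""]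
--     for ch in s:
--         if ch == "?":
--             res = [p + c for p in res for c in ".#"]
--         else:
--             res = [p + ch for p in res]
--     return res
-- ===== Notes on version B (the rewrite author's own statement) =====
-- stated objective: alternative
-- what changed: Replaced A's recursion that replaces the first '?' and recurses on the two resulting strings with a single iterative left-to-right pass that maintains the list of all partial expansions, extending each by '.' and '#' at every '?'; B trades speed on long mostly-fixed strings (it copies every partial at each character) for a shorter, loop-based formulation.
import Mathlib
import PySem

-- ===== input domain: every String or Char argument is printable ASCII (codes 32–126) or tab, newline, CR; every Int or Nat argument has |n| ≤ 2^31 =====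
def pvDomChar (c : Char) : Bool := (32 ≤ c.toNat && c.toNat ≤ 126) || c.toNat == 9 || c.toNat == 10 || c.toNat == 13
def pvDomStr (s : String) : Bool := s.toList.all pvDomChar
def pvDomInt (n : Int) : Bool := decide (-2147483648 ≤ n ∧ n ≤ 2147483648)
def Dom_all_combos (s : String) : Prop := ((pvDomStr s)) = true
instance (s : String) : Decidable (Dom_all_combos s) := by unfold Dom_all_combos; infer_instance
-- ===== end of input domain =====

-- B replaces A's recursion-on-first-'?' with one iterative left-to-right pass growing all partial expansions (same values, same order).

-- ===== PORT A =====
-- hand port of s.replace("?", c, 1): exact here because the pattern "?" is a single character,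
-- so replacing its first occurrence is replacing the first '?' character.
def replaceOnce : List Char → Char → List Char
  | [], _ => []
  | x :: xs, c => if x = '?' then c :: xs else x :: replaceOnce xs c

theorem replaceOnce_count_lt (cs : List Char) (c : Char) (h : '?' ∈ cs) (hc : c ≠ '?') :
    (replaceOnce cs c).count '?' < cs.count '?' := by
  induction cs with
  | nil => cases h
  | cons x xs ih =>
    by_cases hx : x = '?'
    · subst hx
      simp [replaceOnce, hc]
    · have hmem : '?' ∈ xs := by
        rcases List.mem_cons.mp h with h' | h'
        · exact absurd h'.symm hx
        · exact h'
      simpa [replaceOnce, hx, List.count_cons] using ih hmem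

-- A works on strings; we port on the code-point list ('?' ∈ cs is exactly '"?" in s')
-- and A's loop 'for c in [".", "#"]: combos.extend(...)' unrolled over its two literal elements.
def allCombosA (cs : List Char) : List (List Char) :=
  if h : '?' ∈ cs then
    allCombosA (replaceOnce cs '.') ++ allCombosA (replaceOnce cs '#')
  else [cs]
termination_by cs.count '?'
decreasing_by
  · exact replaceOnce_count_lt cs '.' h (by decide)
  · exact replaceOnce_count_lt cs '#' h (by decide)

def all_combos (s : String) : List String := (allCombosA s.toList).map String.ofList

-- ===== PORT B =====
-- one loop step of Source B: the two list comprehensions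
def stepB (res : List (List Char)) (ch : Char) : List (List Char) :=
  if ch = '?' then res.flatMap (fun p => ['.', '#'].map (fun c => p ++ [c]))
  else res.map (fun p => p ++ [ch])

def all_combos_alt (s : String) : List String :=
  (s.toList.foldl stepB [[]]).map String.ofList

-- ===== PRECONDITION & SPEC =====
def Spec_all_combos (s : String) (out : List String) : Prop := out = all_combos_alt s
instance (s : String) (out : List String) : Decidable (Spec_all_combos s out) := by unfold Spec_all_combos; infer_instance

-- ===== CLAIM (what is proved, stated in full; the proofs are below) =====
def Claim_equal_all_combos : Prop := ∀ (s : String), Dom_all_combos s → Spec_all_combos s (all_combos s)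

-- ===== LEMMAS AND PROOFS =====

-- structural (right-fold) characterisation both ports are proved equal to
def rcombos : List Char → List (List Char)
  | [] => [[]]
  | c :: cs =>
      if c = '?' then (rcombos cs).map ('.' :: ·) ++ (rcombos cs).map ('#' :: ·)
      else (rcombos cs).map (c :: ·)

theorem rcombos_of_not_mem (cs : List Char) (h : '?' ∉ cs) : rcombos cs = [cs] := by
  induction cs with
  | nil => rfl
  | cons x xs ih =>
    have hx : x ≠ '?' := fun e => h (e ▸ List.mem_cons_self)
    have hxs : '?' ∉ xs := fun m => h (List.mem_cons_of_mem _ m)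
    simp [rcombos, hx, ih hxs]

theorem rcombos_split (cs : List Char) (h : '?' ∈ cs) :
    rcombos cs = rcombos (replaceOnce cs '.') ++ rcombos (replaceOnce cs '#') := by
  induction cs with
  | nil => cases h
  | cons x xs ih =>
    by_cases hx : x = '?'
    · subst hx
      simp [replaceOnce, rcombos]
    · have hmem : '?' ∈ xs := by
        rcases List.mem_cons.mp h with h' | h'
        · exact absurd h'.symm hx
        · exact h'
      simp only [replaceOnce, if_neg hx, rcombos, ih hmem, List.map_append]

theorem allCombosA_eq_rcombos (cs : List Char) : allCombosA cs = rcombos cs := by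
  fun_induction allCombosA cs with
  | case1 cs h ih1 ih2 =>
      rw [ih1, ih2, ← rcombos_split cs h]
  | case2 cs h =>
      
      rw [rcombos_of_not_mem cs h]

theorem foldl_stepB (cs : List Char) (acc : List (List Char)) :
    cs.foldl stepB acc = acc.flatMap (fun p => (rcombos cs).map (p ++ ·)) := by
  induction cs generalizing acc with
  | nil => simp [rcombos]
  | cons c cs ih =>
    rw [List.foldl_cons, ih]
    by_cases hc : c = '?'
    · subst hc
      have hstep : stepB acc '?' = acc.flatMap (fun p => ['.', '#'].map (fun c => p ++ [c])) :=
        if_pos rfl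
      rw [hstep, List.flatMap_assoc]
      congr 1
      funext p
      simp [rcombos, List.map_map, Function.comp_def]
    · have hstep : stepB acc c = acc.map (fun p => p ++ [c]) := if_neg hc
      rw [hstep, List.flatMap_map]
      congr 1
      funext p
      simp [rcombos, hc, List.map_map, Function.comp_def]

theorem alt_eq_rcombos (cs : List Char) : cs.foldl stepB [[]] = rcombos cs := by
  rw [foldl_stepB]
  simp

-- ===== VERDICT (by name: the statement is the Claim_ definition above) =====
theorem all_combos_spec : Claim_equal_all_combos := by
  intro s _
  unfold Spec_all_combos all_combos all_combos_alt
  rw [allCombosA_eq_rcombos, alt_eq_rcombos]
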